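-- pv_equiv track=rewrite | github.com/ffmelo-coder/FPAA-GRUPO-5 | Trabalho 2/floodfill2.py | colorir_todas_regioes
-- ===== SOURCE A (Python) =====
-- from collections import deque
-- from typing import List, Tuple, Dict, Optional
--
-- def colorir_regiao(grid: List[List[int]], start: Tuple[int, int], color: int) -> bool:
--     """
--     Preenche a região conectada (4-direções) de células com valor 0 a partir de 'start'
--     com o valor 'color'. Retorna True se preenchimento ocorreu, False caso o ponto
--     de início não seja uma célula navegável (0).
--     """
--     linhas = len(grid)
--     if linhas == 0:
--         return False
--     colunas = len(grid[0])
--     r0, c0 = start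
--     if not (0 <= r0 < linhas and 0 <= c0 < colunas):
--         return False
--     if grid[r0][c0] != 0:
--         return False
--
--     dq = deque()
--     dq.append((r0, c0))
--     grid[r0][c0] = color
--     while dq:
--         r, c = dq.popleft()
--         for dr, dc in [(-1, 0), (0, 1), (1, 0), (0, -1)]:
--             nr, nc = r + dr, c + dc
--             if 0 <= nr < linhas and 0 <= nc < colunas and grid[nr][nc] == 0:
--                 grid[nr][nc] = color
--                 dq.append((nr, nc))
--     return True
--
-- def colorir_todas_regioes(grid: List[List[int]], inicio: Optional[Tuple[int, int]] = None,
--                            primeiro_cor: int = 2) -> Dict[int, List[Tuple[int, int]]]: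
--     """
--     Percorre o grid e coloriza todas as regiões navegáveis (valores 0), começando
--     pela região que contém 'inicio' (se fornecido e for 0). Cada região recebe
--     uma cor incremental (2,3,4,...). Retorna dicionário mapeando cor -> lista de
--     coordenadas preenchidas por essa cor.
--
--     Observações:
--     - Células com valor 1 são obstáculos e não são alteradas.
--     - Células com valor >=2 são consideradas já coloridas e preservadas.
--     """
--     linhas = len(grid)
--     if linhas == 0:
--         return {}
--     colunas = len(grid[0])
--
--     # Função auxiliar para procurar próxima célula 0
--     def encontrar_proximo_zero() -> Optional[Tuple[int, int]]:
--         for i in range(linhas):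
--             for j in range(colunas):
--                 if grid[i][j] == 0:
--                     return (i, j)
--         return None
--
--     resultados: Dict[int, List[Tuple[int, int]]] = {}
--     cor_atual = primeiro_cor
--
--     # Se inicio especificado e é 0, primeiro preenche a partir dele
--     if inicio is not None:
--         r0, c0 = inicio
--         if 0 <= r0 < linhas and 0 <= c0 < colunas and grid[r0][c0] == 0:
--             # coleciona coordenadas preenchidas para registro
--             # preenchimento coloca a cor nas células
--             colorir_regiao(grid, inicio, cor_atual)
--             # recolher coords preenchidas (varredura simples)
--             coords = []
--             for i in range(linhas):
--                 for j in range(colunas):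
--                     if grid[i][j] == cor_atual:
--                         coords.append((i, j))
--             resultados[cor_atual] = coords
--             cor_atual += 1
--
--     # Preenche as demais regiões até não restarem zeros
--     while True:
--         proximo = encontrar_proximo_zero()
--         if proximo is None:
--             break
--         colorir_regiao(grid, proximo, cor_atual)
--         coords = []
--         for i in range(linhas):
--             for j in range(colunas):
--                 if grid[i][j] == cor_atual:
--                     coords.append((i, j))
--         resultados[cor_atual] = coords
--         cor_atual += 1
--
--     return resultados
-- ===== SOURCE B (Python) =====
-- from collections import deque
-- from typing import List, Tuple, Dict, Optional
--
--
-- def colorir_todas_regioes(grid: List[List[int]], inicio: Optional[Tuple[int, int]] = None,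
--                           primeiro_cor: int = 2) -> Dict[int, List[Tuple[int, int]]]:
--     """Single-sweep flood fill: discover regions in one row-major pass (cells already
--     colored are skipped), then build the color->coords map with ONE final scan of the
--     grid instead of a full-grid rescan per region."""
--     linhas = len(grid)
--     if linhas == 0:
--         return {}
--     colunas = len(grid[0])
--
--     def preencher(r0: int, c0: int, cor: int) -> None:
--         grid[r0][c0] = cor
--         dq = deque([(r0, c0)])
--         while dq:
--             r, c = dq.popleft()
--             for dr, dc in ((-1, 0), (0, 1), (1, 0), (0, -1)):
--                 nr, nc = r + dr, c + dc
--                 if 0 <= nr < linhas and 0 <= nc < colunas and grid[nr][nc] == 0: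
--                     grid[nr][nc] = cor
--                     dq.append((nr, nc))
--
--     cor = primeiro_cor
--     if inicio is not None:
--         r0, c0 = inicio
--         if 0 <= r0 < linhas and 0 <= c0 < colunas and grid[r0][c0] == 0:
--             preencher(r0, c0, cor)
--             cor += 1
--
--     for i in range(linhas):
--         for j in range(colunas):
--             if grid[i][j] == 0:
--                 preencher(i, j, cor)
--                 cor += 1
--
--     resultados: Dict[int, List[Tuple[int, int]]] = {c: [] for c in range(primeiro_cor, cor)}
--     for i in range(linhas):
--         for j in range(colunas):
--             v = grid[i][j]
--             if primeiro_cor <= v < cor: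
--                 resultados[v].append((i, j))
--     return resultados
-- ===== Notes on version B (the rewrite author's own statement) =====
-- stated objective: faster
-- what changed: A rescans the whole grid from scratch to find each next region and does another full-grid scan per region to collect its coordinates (O(R*N)); B discovers all regions in one row-major sweep (already-colored cells are just skipped) and builds the whole color->coords dict with a single final scan of the colored grid (O(N)).
-- outside the precondition, e.g. on colorir_todas_regioes([[0, 0]], None, -1): A returns {-1: [(0, 0), (0, 1)]}, B returns {-1: [(0, 0), (0, 1)]}
import Mathlib
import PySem

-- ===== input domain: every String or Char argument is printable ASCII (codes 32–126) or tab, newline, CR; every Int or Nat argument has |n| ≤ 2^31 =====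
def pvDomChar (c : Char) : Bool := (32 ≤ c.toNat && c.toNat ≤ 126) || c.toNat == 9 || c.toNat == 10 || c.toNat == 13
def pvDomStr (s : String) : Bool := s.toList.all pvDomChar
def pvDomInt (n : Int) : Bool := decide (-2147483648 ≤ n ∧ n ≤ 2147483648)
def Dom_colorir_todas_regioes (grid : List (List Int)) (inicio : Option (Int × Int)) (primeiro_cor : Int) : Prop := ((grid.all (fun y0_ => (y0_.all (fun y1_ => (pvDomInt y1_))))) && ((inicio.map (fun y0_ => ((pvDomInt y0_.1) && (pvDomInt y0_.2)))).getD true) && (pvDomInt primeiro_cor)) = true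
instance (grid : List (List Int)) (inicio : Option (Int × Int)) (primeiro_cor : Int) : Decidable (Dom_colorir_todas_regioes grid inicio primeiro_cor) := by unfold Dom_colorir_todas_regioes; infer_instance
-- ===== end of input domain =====

-- B replaces A's per-region full-grid rescans (next-zero search + coordinate collection)
-- by one discovery sweep plus one final collection scan; both mutate the Python grid the
-- same way, and the equivalence proved is about the returned dict.


-- ===== PORT A =====
-- shared low-level helpers: cell read/write and the 4-neighbour BFS loop, which both
-- Pythons contain verbatim (A's `colorir_regiao` body, B's `preencher`); the `while dq:`
-- loop is ported with fuel that suffices on inputs admitted by Pre_, and the cell-read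
-- default is only reachable on inputs Pre_ excludes (where the Python raises IndexError)
def pvGet (g : List (List Int)) (i j : Int) : Int :=
  (PySem.List.pyGet? ((PySem.List.pyGet? g i).getD []) j).getD 0

def pvSet (g : List (List Int)) (i j v : Int) : List (List Int) :=
  g.set i.toNat ((g.getD i.toNat []).set j.toNat v)

def pvDirs : List (Int × Int) := [(-1, 0), (0, 1), (1, 0), (0, -1)]

def pvBfs (linhas colunas cor : Int) : Nat → List (List Int) → List (Int × Int) → List (List Int)
  | 0, g, _ => g
  | _ + 1, g, [] => g
  | fuel + 1, g, (r, c) :: dq =>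
      let st := pvDirs.foldl (fun (st : List (List Int) × List (Int × Int)) d =>
        let nr := r + d.1
        let nc := c + d.2
        if 0 ≤ nr ∧ nr < linhas ∧ 0 ≤ nc ∧ nc < colunas ∧ pvGet st.1 nr nc = 0 then
          (pvSet st.1 nr nc cor, st.2 ++ [(nr, nc)])
        else st) (g, dq)
      pvBfs linhas colunas cor fuel st.1 st.2

def pvFill (linhas colunas : Int) (g : List (List Int)) (r0 c0 cor : Int) : List (List Int) :=
  pvBfs linhas colunas cor (linhas.toNat * colunas.toNat + 2) (pvSet g r0 c0 cor) [(r0, c0)]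

def colorir_regiao (grid : List (List Int)) (start : Int × Int) (color : Int) :
    List (List Int) × Bool :=
  let linhas : Int := grid.length
  if linhas = 0 then (grid, false)
  else
    let colunas : Int := (grid.headD []).length
    if ¬(0 ≤ start.1 ∧ start.1 < linhas ∧ 0 ≤ start.2 ∧ start.2 < colunas) then (grid, false)
    else if pvGet grid start.1 start.2 ≠ 0 then (grid, false)
    else (pvFill linhas colunas grid start.1 start.2 color, true)

def pvFindZero (g : List (List Int)) (linhas colunas : Int) : Option (Int × Int) :=
  (PySem.List.pyRange 0 linhas 1).findSome? (fun i =>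
    (PySem.List.pyRange 0 colunas 1).findSome? (fun j =>
      if pvGet g i j = 0 then some (i, j) else none))

def pvScanColor (g : List (List Int)) (linhas colunas cor : Int) : List (Int × Int) :=
  (PySem.List.pyRange 0 linhas 1).foldl (fun acc i =>
    (PySem.List.pyRange 0 colunas 1).foldl (fun acc j =>
      if pvGet g i j = cor then acc ++ [(i, j)] else acc) acc) []

def pvOuterA (linhas colunas : Int) :
    Nat → List (List Int) → PySem.Dict Int (List (Int × Int)) → Int →
      PySem.Dict Int (List (Int × Int))
  | 0, _, res, _ => res
  | fuel + 1, g, res, cor =>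
      match pvFindZero g linhas colunas with
      | none => res
      | some p =>
          let g' := (colorir_regiao g p cor).1
          let coords := pvScanColor g' linhas colunas cor
          pvOuterA linhas colunas fuel g' (res.insert cor coords) (cor + 1)

def colorir_todas_regioes (grid : List (List Int)) (inicio : Option (Int × Int)) (primeiro_cor : Int) : List (Int × List (Int × Int)) :=
  let linhas : Int := grid.length
  if linhas = 0 then []
  else
    let colunas : Int := (grid.headD []).length
    let st : List (List Int) × PySem.Dict Int (List (Int × Int)) × Int :=
      match inicio with
      | none => (grid, PySem.Dict.empty, primeiro_cor)
      | some s =>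
          if 0 ≤ s.1 ∧ s.1 < linhas ∧ 0 ≤ s.2 ∧ s.2 < colunas ∧ pvGet grid s.1 s.2 = 0 then
            let g1 := (colorir_regiao grid s primeiro_cor).1
            let coords := pvScanColor g1 linhas colunas primeiro_cor
            (g1, PySem.Dict.empty.insert primeiro_cor coords, primeiro_cor + 1)
          else (grid, PySem.Dict.empty, primeiro_cor)
    (pvOuterA linhas colunas (linhas.toNat * colunas.toNat + 1) st.1 st.2.1 st.2.2).items

-- ===== PORT B =====
def pvOuterB (linhas colunas : Int) (g0 : List (List Int)) (cor0 : Int) :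
    List (List Int) × Int :=
  (PySem.List.pyRange 0 linhas 1).foldl (fun st i =>
    (PySem.List.pyRange 0 colunas 1).foldl (fun (st : List (List Int) × Int) j =>
      if pvGet st.1 i j = 0 then (pvFill linhas colunas st.1 i j st.2, st.2 + 1)
      else st) st) (g0, cor0)

def pvCollect (linhas colunas a b : Int) (g : List (List Int)) :
    PySem.Dict Int (List (Int × Int)) :=
  let d0 := (PySem.List.pyRange a b 1).foldl
    (fun (d : PySem.Dict Int (List (Int × Int))) c => d.insert c []) PySem.Dict.empty
  (PySem.List.pyRange 0 linhas 1).foldl (fun d i =>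
    (PySem.List.pyRange 0 colunas 1).foldl (fun (d : PySem.Dict Int (List (Int × Int))) j =>
      if a ≤ pvGet g i j ∧ pvGet g i j < b then
        d.modify (pvGet g i j) [] (fun l => l ++ [(i, j)])
      else d) d) d0

def colorir_todas_regioes_alt (grid : List (List Int)) (inicio : Option (Int × Int)) (primeiro_cor : Int) : List (Int × List (Int × Int)) :=
  let linhas : Int := grid.length
  if linhas = 0 then []
  else
    let colunas : Int := (grid.headD []).length
    let st0 : List (List Int) × Int :=
      match inicio with
      | none => (grid, primeiro_cor)
      | some s =>
          if 0 ≤ s.1 ∧ s.1 < linhas ∧ 0 ≤ s.2 ∧ s.2 < colunas ∧ pvGet grid s.1 s.2 = 0 then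
            (pvFill linhas colunas grid s.1 s.2 primeiro_cor, primeiro_cor + 1)
          else (grid, primeiro_cor)
    let st := pvOuterB linhas colunas st0.1 st0.2
    (pvCollect linhas colunas primeiro_cor st.2 st.1).items

-- ===== PRECONDITION & SPEC =====
-- number of zero cells in the scanned region (cells (i,j) with i < len(grid), j < len(grid[0]))
def pvZeros (grid : List (List Int)) : Nat :=
  ((PySem.List.pyRange 0 grid.length 1).flatMap (fun i =>
    (PySem.List.pyRange 0 (grid.headD []).length 1).map (fun j => (i, j)))).countP
    (fun p => pvGet grid p.1 p.2 = 0)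

-- Pre_ excludes (a) grids with a row shorter than the first row, on which A raises
-- IndexError, and (b) non-positive primeiro_cor with more zero cells than -primeiro_cor:
-- there A can reach fill color 0 and loop forever; the few such inputs whose region count
-- still stays below -primeiro_cor (so A returns, and B agrees) are excluded conservatively.
def Pre_colorir_todas_regioes (grid : List (List Int)) (inicio : Option (Int × Int)) (primeiro_cor : Int) : Prop :=
  (∀ row ∈ grid, ((grid.headD []).length : Int) ≤ row.length) ∧
  (1 ≤ primeiro_cor ∨ primeiro_cor + (pvZeros grid : Int) ≤ 0)

instance (grid : List (List Int)) (inicio : Option (Int × Int)) (primeiro_cor : Int) : Decidable (Pre_colorir_todas_regioes grid inicio primeiro_cor) := by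
  unfold Pre_colorir_todas_regioes; infer_instance

def pvWitness_colorir_todas_regioes : List (List Int) × (Option (Int × Int)) × Int :=
  ([[0, 1], [1, 0]], some (0, 0), 2)

def Spec_colorir_todas_regioes (grid : List (List Int)) (inicio : Option (Int × Int)) (primeiro_cor : Int) (out : List (Int × List (Int × Int))) : Prop := out = colorir_todas_regioes_alt grid inicio primeiro_cor
instance (grid : List (List Int)) (inicio : Option (Int × Int)) (primeiro_cor : Int) (out : List (Int × List (Int × Int))) : Decidable (Spec_colorir_todas_regioes grid inicio primeiro_cor out) := by unfold Spec_colorir_todas_regioes; infer_instance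

-- ===== CLAIM (what is proved, stated in full; the proofs are below) =====
def Claim_equal_colorir_todas_regioes : Prop := ∀ (grid : List (List Int)) (inicio : Option (Int × Int)) (primeiro_cor : Int), Dom_colorir_todas_regioes grid inicio primeiro_cor → Pre_colorir_todas_regioes grid inicio primeiro_cor → Spec_colorir_todas_regioes grid inicio primeiro_cor (colorir_todas_regioes grid inicio primeiro_cor)

-- ===== LEMMAS AND PROOFS =====

-- proof-side vocabulary: the row-major cell list, zero count, per-color coordinate list,
-- the canonical dict, B's per-cell step, the grid-shape invariant and the
-- "fill changes only 0-cells into cor" relation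
def pvRM (lin col : Int) : List (Int × Int) :=
  (PySem.List.pyRange 0 lin 1).flatMap (fun i =>
    (PySem.List.pyRange 0 col 1).map (fun j => (i, j)))

def pvZr (lin col : Int) (g : List (List Int)) : Nat :=
  (pvRM lin col).countP (fun p => pvGet g p.1 p.2 = 0)

def pvCoords (lin col : Int) (g : List (List Int)) (c : Int) : List (Int × Int) :=
  (pvRM lin col).filter (fun p => pvGet g p.1 p.2 = c)

def pvDmap (lin col a b : Int) (g : List (List Int)) : List (Int × List (Int × Int)) :=
  (PySem.List.pyRange a b 1).map (fun c => (c, pvCoords lin col g c))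

def pvStep (lin col : Int) (st : List (List Int) × Int) (p : Int × Int) :
    List (List Int) × Int :=
  if pvGet st.1 p.1 p.2 = 0 then (pvFill lin col st.1 p.1 p.2 st.2, st.2 + 1) else st

def pvGS (lin col : Int) (g : List (List Int)) : Prop :=
  (g.length : Int) = lin ∧ ((g.headD []).length : Int) = col ∧
    ∀ row ∈ g, col ≤ (row.length : Int)

def pvChg (cor : Int) (g g' : List (List Int)) : Prop :=
  ∀ i j, 0 ≤ i → 0 ≤ j →
    pvGet g' i j = pvGet g i j ∨ (pvGet g i j = 0 ∧ pvGet g' i j = cor)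

theorem pvGet_nonneg (g : List (List Int)) (i j : Int) (hi : 0 ≤ i) (hj : 0 ≤ j) :
    pvGet g i j = (g.getD i.toNat []).getD j.toNat 0 := by
  rw [pvGet, PySem.List.pyGet?_of_nonneg (h := hi), PySem.List.pyGet?_of_nonneg (h := hj)]
  simp [List.getD]

theorem pvGet_toNat_congr (g : List (List Int)) {i j a b : Int} (hi : 0 ≤ i) (hj : 0 ≤ j)
    (ha : 0 ≤ a) (hb : 0 ≤ b) (h1 : a.toNat = i.toNat) (h2 : b.toNat = j.toNat) :
    pvGet g a b = pvGet g i j := by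
  rw [pvGet_nonneg g a b ha hb, pvGet_nonneg g i j hi hj, h1, h2]

theorem pvSet_map_length (g : List (List Int)) (i j v) :
    (pvSet g i j v).map List.length = g.map List.length := by
  unfold pvSet
  by_cases h : i.toNat < g.length
  · rw [List.map_set]
    have h2 : ((g.getD i.toNat []).set j.toNat v).length = g[i.toNat].length := by
      simp [List.getD, List.getElem?_eq_getElem h]
    rw [h2, ← List.getElem_map (f := List.length) (h := by simpa using h), List.set_getElem_self]
  · rw [List.set_eq_of_length_le (by omega)]

theorem pvSet_get (g : List (List Int)) (i j v a b : Int) (hi : 0 ≤ i) (hj : 0 ≤ j)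
    (ha : 0 ≤ a) (hb : 0 ≤ b) :
    pvGet (pvSet g i j v) a b =
      if a.toNat = i.toNat ∧ b.toNat = j.toNat ∧ i.toNat < g.length ∧
          j.toNat < (g.getD i.toNat []).length then v
      else pvGet g a b := by
  rw [pvGet_nonneg _ _ _ ha hb, pvGet_nonneg g a b ha hb, pvSet]
  simp only [List.getD]
  by_cases h1 : a.toNat = i.toNat
  · rw [h1]
    by_cases h2 : i.toNat < g.length
    · rw [List.getElem?_set_self h2]
      simp only [Option.getD_some]
      have hrow : (g[i.toNat]?.getD ([] : List Int)) = g[i.toNat] := by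
        rw [List.getElem?_eq_getElem h2]; rfl
      rw [hrow]
      by_cases h3 : b.toNat = j.toNat
      · rw [h3]
        by_cases h4 : j.toNat < g[i.toNat].length
        · rw [List.getElem?_set_self h4]
          simp [h1, h3, h2, h4]
        · rw [List.set_eq_of_length_le (by omega)]
          simp [h1, h3, h2, h4]
      · rw [List.getElem?_set_ne (fun h => h3 h.symm)]
        simp [h3]
    · rw [List.set_eq_of_length_le (by omega)]
      simp [h2]
  · rw [List.getElem?_set_ne (fun h => h1 h.symm)]
    simp [h1]

theorem pvChg_refl (cor : Int) (g : List (List Int)) : pvChg cor g g :=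
  fun _ _ _ _ => Or.inl rfl

theorem pvChg_trans {cor : Int} {g g' g'' : List (List Int)}
    (h1 : pvChg cor g g') (h2 : pvChg cor g' g'') : pvChg cor g g'' := by
  intro i j hi hj
  rcases h2 i j hi hj with h | ⟨hz, hc⟩
  · rcases h1 i j hi hj with h' | ⟨hz', hc'⟩
    · exact Or.inl (h.trans h')
    · exact Or.inr ⟨hz', h ▸ hc'⟩
  · rcases h1 i j hi hj with h' | ⟨hz', hc'⟩
    · exact Or.inr ⟨h' ▸ hz, hc⟩
    · exact Or.inr ⟨hz', hc⟩

theorem pvChg_set {cor : Int} {g : List (List Int)} {i j : Int}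
    (hi : 0 ≤ i) (hj : 0 ≤ j) (hz : pvGet g i j = 0) :
    pvChg cor g (pvSet g i j cor) := by
  intro a b ha hb
  rw [pvSet_get g i j cor a b hi hj ha hb]
  split_ifs with h
  · exact Or.inr ⟨(pvGet_toNat_congr g hi hj ha hb h.1 h.2.1) ▸ hz, rfl⟩
  · exact Or.inl rfl

theorem pvGS_of_map_length {lin col : Int} {g g' : List (List Int)}
    (h : g'.map List.length = g.map List.length) (hg : pvGS lin col g) :
    pvGS lin col g' := by
  obtain ⟨h1, h2, h3⟩ := hg
  have hlen : g'.length = g.length := by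
    have := congrArg List.length h; simpa using this
  refine ⟨by rw [hlen]; exact h1, ?_, ?_⟩
  · cases g' with
    | nil => cases g with
      | nil => exact h2
      | cons r t => simp at hlen
    | cons r' t' => cases g with
      | nil => simp at hlen
      | cons r t =>
        simp only [List.map_cons, List.cons.injEq] at h
        simpa [h.1] using h2
  · intro row hrow
    have : row.length ∈ g'.map List.length := List.mem_map_of_mem hrow
    rw [h] at this
    obtain ⟨row₀, hrow₀, hl⟩ := List.mem_map.1 this
    rw [← hl]
    exact h3 row₀ hrow₀

theorem pvBfs_fold_step (lin col cor r c : Int) (ds : List (Int × Int)) :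
    ∀ st : List (List Int) × List (Int × Int),
      pvChg cor st.1 ((ds.foldl (fun (st : List (List Int) × List (Int × Int)) d =>
        let nr := r + d.1
        let nc := c + d.2
        if 0 ≤ nr ∧ nr < lin ∧ 0 ≤ nc ∧ nc < col ∧ pvGet st.1 nr nc = 0 then
          (pvSet st.1 nr nc cor, st.2 ++ [(nr, nc)])
        else st) st).1) ∧
      ((ds.foldl (fun (st : List (List Int) × List (Int × Int)) d =>
        let nr := r + d.1
        let nc := c + d.2
        if 0 ≤ nr ∧ nr < lin ∧ 0 ≤ nc ∧ nc < col ∧ pvGet st.1 nr nc = 0 then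
          (pvSet st.1 nr nc cor, st.2 ++ [(nr, nc)])
        else st) st).1).map List.length = st.1.map List.length := by
  induction ds with
  | nil => exact fun st => ⟨pvChg_refl cor st.1, rfl⟩
  | cons d ds ih =>
    intro st
    simp only [List.foldl_cons]
    split_ifs with h
    · obtain ⟨h1, h2, h3, h4, h5⟩ := h
      refine ⟨pvChg_trans (pvChg_set h1 h3 h5) (ih _).1, ((ih _).2).trans ?_⟩
      exact pvSet_map_length st.1 _ _ cor
    · exact ih st

theorem pvBfs_chg (lin col cor : Int) (fuel : Nat) :
    ∀ g dq, pvChg cor g (pvBfs lin col cor fuel g dq) ∧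
      (pvBfs lin col cor fuel g dq).map List.length = g.map List.length := by
  induction fuel with
  | zero => exact fun g dq => ⟨pvChg_refl cor g, rfl⟩
  | succ n ih =>
    intro g dq
    cases dq with
    | nil => exact ⟨pvChg_refl cor g, rfl⟩
    | cons p dq =>
      obtain ⟨r, c⟩ := p
      simp only [pvBfs]
      obtain ⟨hc, hm⟩ := pvBfs_fold_step lin col cor r c pvDirs (g, dq)
      obtain ⟨hc', hm'⟩ := ih _ _
      exact ⟨pvChg_trans hc hc', hm'.trans hm⟩

theorem pvFill_chg (lin col : Int) (g : List (List Int)) (r0 c0 cor : Int)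
    (hr : 0 ≤ r0) (hc : 0 ≤ c0) (hz : pvGet g r0 c0 = 0) :
    pvChg cor g (pvFill lin col g r0 c0 cor) ∧
      (pvFill lin col g r0 c0 cor).map List.length = g.map List.length := by
  obtain ⟨h1, h2⟩ := pvBfs_chg lin col cor (lin.toNat * col.toNat + 2) (pvSet g r0 c0 cor) [(r0, c0)]
  exact ⟨pvChg_trans (pvChg_set hr hc hz) h1,
    h2.trans (pvSet_map_length g r0 c0 cor)⟩

theorem pvFill_start (lin col : Int) (g : List (List Int)) (r0 c0 cor : Int)
    (hr : 0 ≤ r0) (hc : 0 ≤ c0) (hz : pvGet g r0 c0 = 0)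
    (hrl : r0.toNat < g.length) (hcl : c0.toNat < (g.getD r0.toNat []).length) :
    pvGet (pvFill lin col g r0 c0 cor) r0 c0 = cor := by
  have hset : pvGet (pvSet g r0 c0 cor) r0 c0 = cor := by
    rw [pvSet_get g r0 c0 cor r0 c0 hr hc hr hc]
    exact if_pos ⟨rfl, rfl, hrl, hcl⟩
  obtain ⟨h1, _⟩ := pvBfs_chg lin col cor (lin.toNat * col.toNat + 2) (pvSet g r0 c0 cor) [(r0, c0)]
  rw [pvFill]
  rcases h1 r0 c0 hr hc with h | ⟨_, h⟩
  · rw [h, hset]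
  · exact h

theorem mem_pvRM {lin col : Int} {p : Int × Int} :
    p ∈ pvRM lin col ↔ 0 ≤ p.1 ∧ p.1 < lin ∧ 0 ≤ p.2 ∧ p.2 < col := by
  obtain ⟨i, j⟩ := p
  simp [pvRM, List.mem_flatMap, PySem.List.mem_pyRange_one]
  tauto

theorem length_pvRM (lin col : Int) :
    (pvRM lin col).length = lin.toNat * col.toNat := by
  simp [pvRM, List.length_flatMap, PySem.List.length_pyRange_one]

-- countP over pvRM only decreases under a fill (and strictly at the filled cell)

theorem pvZr_lt {cor : Int} {g g' : List (List Int)} (hcor : cor ≠ 0)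
    (hchg : pvChg cor g g') {lin col : Int} {p : Int × Int}
    (hp : p ∈ pvRM lin col) (hz : pvGet g p.1 p.2 = 0)
    (hnz : pvGet g' p.1 p.2 = cor) :
    pvZr lin col g' < pvZr lin col g := by
  obtain ⟨l, r, hsplit⟩ := List.append_of_mem hp
  unfold pvZr
  rw [hsplit, List.countP_append, List.countP_append, List.countP_cons, List.countP_cons]
  have hl : l.countP (fun q => pvGet g' q.1 q.2 = 0) ≤ l.countP (fun q => pvGet g q.1 q.2 = 0) := by
    apply List.countP_mono_left
    intro q hq hzq
    simp only [decide_eq_true_eq] at hzq ⊢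
    have hqm : q ∈ pvRM lin col := by rw [hsplit]; exact List.mem_append_left _ hq
    obtain ⟨h1, _, h3, _⟩ := mem_pvRM.1 hqm
    rcases hchg q.1 q.2 h1 h3 with h | ⟨h0, hc⟩
    · rw [← h]; exact hzq
    · exact absurd (hc ▸ hzq) hcor
  have hr : r.countP (fun q => pvGet g' q.1 q.2 = 0) ≤ r.countP (fun q => pvGet g q.1 q.2 = 0) := by
    apply List.countP_mono_left
    intro q hq hzq
    simp only [decide_eq_true_eq] at hzq ⊢
    have hqm : q ∈ pvRM lin col := by
      rw [hsplit]; exact List.mem_append_right _ (List.mem_cons_of_mem _ hq)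
    obtain ⟨h1, _, h3, _⟩ := mem_pvRM.1 hqm
    rcases hchg q.1 q.2 h1 h3 with h | ⟨h0, hc⟩
    · rw [← h]; exact hzq
    · exact absurd (hc ▸ hzq) hcor
  simp only [hz, hnz, decide_eq_true_eq]
  simp [hcor]
  omega

theorem pvCoords_congr {cor : Int} {g g' : List (List Int)} (hchg : pvChg cor g g')
    {lin col c : Int} (hc0 : c ≠ 0) (hcc : c ≠ cor) :
    pvCoords lin col g' c = pvCoords lin col g c := by
  apply List.filter_congr
  intro p hp
  obtain ⟨h1, _, h3, _⟩ := mem_pvRM.1 hp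
  rcases hchg p.1 p.2 h1 h3 with h | ⟨h0, hcv⟩
  · rw [h]
  · simp only [h0, hcv]
    simp [Ne.symm hc0, Ne.symm hcc]

theorem pvScanColor_eq (g : List (List Int)) (lin col cor : Int) :
    pvScanColor g lin col cor = pvCoords lin col g cor := by
  unfold pvScanColor pvCoords pvRM
  rw [PySem.List.foldl_congr_mem
    (g := fun acc i => acc ++ ((PySem.List.pyRange 0 col 1).filter
      (fun j => decide (pvGet g i j = cor))).map (fun j => (i, j)))]
  · rw [PySem.List.foldl_append_eq_flatMap]
    rw [List.filter_flatMap]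
    simp only [List.nil_append]
    congr 1
    funext i
    rw [List.filter_map]
    rfl
  · intro acc i _
    rw [PySem.List.foldl_append_ite (p := fun j => pvGet g i j = cor) (f := fun j => (i, j))]

theorem findSome?_if_eq_find?_map {α β : Type} (p : α → Prop) [DecidablePred p]
    (f : α → β) (l : List α) :
    l.findSome? (fun x => if p x then some (f x) else none)
      = (l.find? (fun x => decide (p x))).map f := by
  induction l with
  | nil => rfl
  | cons x xs ih =>
    by_cases h : p x <;> simp [List.findSome?_cons, List.find?_cons, h, ih]

theorem pvFindZero_eq (g : List (List Int)) (lin col : Int) :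
    pvFindZero g lin col = (pvRM lin col).find? (fun p => decide (pvGet g p.1 p.2 = 0)) := by
  unfold pvFindZero pvRM
  rw [List.find?_flatMap]
  congr 1
  funext i
  rw [List.find?_map]
  rw [findSome?_if_eq_find?_map (p := fun j => pvGet g i j = 0) (f := fun j => (i, j))]
  rfl

theorem find?_first {α : Type} (p : α → Bool) (pre ps : List α) (x : α)
    (hpre : ∀ y ∈ pre, ¬ p y) (hx : p x) :
    (pre ++ x :: ps).find? p = some x := by
  rw [List.find?_append]
  rw [List.find?_eq_none.2 hpre]
  simp [List.find?_cons, hx]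

theorem pvCollect_items (lin col a b : Int) (g : List (List Int)) :
    (pvCollect lin col a b g).items = pvDmap lin col a b g := by
  unfold pvCollect
  -- initial dict: fresh distinct keys into empty
  have hinit : ((PySem.List.pyRange a b 1).foldl
      (fun (d : PySem.Dict Int (List (Int × Int))) c => d.insert c []) PySem.Dict.empty).items
      = (PySem.List.pyRange a b 1).map (fun c => (c, ([] : List (Int × Int)))) := by
    rw [PySem.Dict.items_foldl_insert_fresh _ (fun c => c) (fun _ => []) _
      (fun c _ => PySem.Dict.contains_empty c) (by simpa using PySem.List.nodup_pyRange_one a b)]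
    simp [PySem.Dict.empty]
  set d0 := (PySem.List.pyRange a b 1).foldl
    (fun (d : PySem.Dict Int (List (Int × Int))) c => d.insert c []) PySem.Dict.empty with hd0
  -- flatten the nested scan to a single fold over pvRM
  have hflat : (PySem.List.pyRange 0 lin 1).foldl (fun d i =>
      (PySem.List.pyRange 0 col 1).foldl (fun (d : PySem.Dict Int (List (Int × Int))) j =>
        if a ≤ pvGet g i j ∧ pvGet g i j < b then
          d.modify (pvGet g i j) [] (fun l => l ++ [(i, j)])
        else d) d) d0
      = (pvRM lin col).foldl (fun (d : PySem.Dict Int (List (Int × Int))) p =>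
          if a ≤ pvGet g p.1 p.2 ∧ pvGet g p.1 p.2 < b then
            d.modify (pvGet g p.1 p.2) [] (fun l => l ++ [p])
          else d) d0 := by
    rw [pvRM, List.foldl_flatMap]
    congr 1
    funext d i
    rw [List.foldl_map]
  rw [hflat]
  rw [PySem.List.foldl_ite_eq_foldl_filter
    (p := fun p : Int × Int => a ≤ pvGet g p.1 p.2 ∧ pvGet g p.1 p.2 < b)
    (f := fun (d : PySem.Dict Int (List (Int × Int))) p =>
      d.modify (pvGet g p.1 p.2) [] (fun l => l ++ [p]))]
  set L := (pvRM lin col).filter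
    (fun p => decide (a ≤ pvGet g p.1 p.2 ∧ pvGet g p.1 p.2 < b)) with hL
  -- keys are unchanged
  have hkd0 : d0.keys = PySem.List.pyRange a b 1 := by
    have : d0.keys = d0.items.map Prod.fst := rfl
    rw [this, hinit]
    simp [Function.comp_def]
  have hkeys : ((L.foldl (fun (d : PySem.Dict Int (List (Int × Int))) p =>
      d.modify (pvGet g p.1 p.2) [] (fun l => l ++ [p])) d0)).keys
      = PySem.List.pyRange a b 1 := by
    rw [PySem.Dict.keys_foldl_modify_key L (fun p => pvGet g p.1 p.2) []
      (fun _ p l => l ++ [p]) d0]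
    rw [PySem.Set.update_eq_append_filter]
    have : List.filter (fun y => !PySem.Set.contains d0.keys y)
        (PySem.Set.ofList (L.map (fun p => pvGet g p.1 p.2))) = [] := by
      rw [List.filter_eq_nil_iff]
      intro y hy
      have hy' : y ∈ L.map (fun p => pvGet g p.1 p.2) := by
        have := PySem.Set.mem_ofList (xs := L.map (fun p => pvGet g p.1 p.2)) (y := y)
        exact this.1 hy
      obtain ⟨p, hp, hv⟩ := List.mem_map.1 hy'
      have hrange : a ≤ y ∧ y < b := by
        have := List.of_mem_filter hp
        simp only [decide_eq_true_eq] at this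
        omega
      simp [hkd0, PySem.List.mem_pyRange_one]
      omega
    rw [this, List.append_nil, hkd0]
  have hnodup : ((L.foldl (fun (d : PySem.Dict Int (List (Int × Int))) p =>
      d.modify (pvGet g p.1 p.2) [] (fun l => l ++ [p])) d0)).keys.Nodup := by
    rw [hkeys]; simpa using PySem.List.nodup_pyRange_one a b
  rw [PySem.Dict.items_eq_map_keys _ hnodup []]
  rw [hkeys, pvDmap]
  apply List.map_congr_left
  intro c hc
  have hcr : a ≤ c ∧ c < b := PySem.List.mem_pyRange_one.1 hc
  congr 1
  -- value at key c
  have hfold : (L.foldl (fun (d : PySem.Dict Int (List (Int × Int))) p =>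
      d.modify (pvGet g p.1 p.2) [] (fun l => l ++ [p])) d0)
      = ((L.map (fun p => (pvGet g p.1 p.2, p))).foldl
          (fun (d : PySem.Dict Int (List (Int × Int))) q =>
            d.modify q.1 [] (fun l => l ++ [q.2])) d0) := by
    rw [List.foldl_map]
  rw [hfold, PySem.Dict.getD_foldl_modify_append]
  have hd0c : d0.getD c [] = [] := by
    apply PySem.Dict.getD_of_mem_items
    · rw [hinit]
      exact List.mem_map.2 ⟨c, hc, rfl⟩
    · rw [hkd0]; simpa using PySem.List.nodup_pyRange_one a b
  rw [hd0c, List.nil_append]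
  -- (L.map (v,p)).filter (fst == c) |>.map snd  =  pvCoords … c
  rw [List.filter_map, List.map_map]
  have : (fun q : Int × (Int × Int) => q.1 == c) ∘ (fun p => (pvGet g p.1 p.2, p))
      = fun p : Int × Int => pvGet g p.1 p.2 == c := rfl
  rw [this]
  have : ((fun x : Int × (Int × Int) => x.2) ∘ (fun p => (pvGet g p.1 p.2, p)))
      = id := rfl
  rw [this, List.map_id, hL, List.filter_filter, pvCoords]
  apply List.filter_congr
  intro p _
  by_cases h : pvGet g p.1 p.2 = c
  · simp [h, hcr.1, hcr.2]
  · simp [h]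

theorem pvOuterB_eq (lin col : Int) (g0 : List (List Int)) (cor0 : Int) :
    pvOuterB lin col g0 cor0 = (pvRM lin col).foldl (pvStep lin col) (g0, cor0) := by
  unfold pvOuterB pvRM
  rw [List.foldl_flatMap]
  congr 1
  funext st i
  rw [List.foldl_map]
  rfl

theorem colorir_regiao_eq {lin col : Int} {g : List (List Int)} {p : Int × Int} {cor : Int}
    (hGS : pvGS lin col g) (hb : 0 ≤ p.1 ∧ p.1 < lin ∧ 0 ≤ p.2 ∧ p.2 < col)
    (hz : pvGet g p.1 p.2 = 0) :
    colorir_regiao g p cor = (pvFill lin col g p.1 p.2 cor, true) := by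
  obtain ⟨h1, h2, _⟩ := hGS
  unfold colorir_regiao
  rw [h1, h2]
  rw [if_neg (by omega), if_neg (by omega), if_neg (by simp [hz])]

theorem pvRM_row_bound {lin col : Int} {g : List (List Int)} (hGS : pvGS lin col g)
    {p : Int × Int} (hb : 0 ≤ p.1 ∧ p.1 < lin ∧ 0 ≤ p.2 ∧ p.2 < col) :
    p.1.toNat < g.length ∧ p.2.toNat < (g.getD p.1.toNat []).length := by
  obtain ⟨h1, h2, h3⟩ := hGS
  have hrl : p.1.toNat < g.length := by omega
  have hrow : g.getD p.1.toNat [] ∈ g := by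
    rw [List.getD, List.getElem?_eq_getElem hrl]
    exact List.getElem_mem _
  have := h3 _ hrow
  exact ⟨hrl, by omega⟩

theorem pvMain (lin col a : Int) :
    ∀ (ps pre : List (Int × Int)) (fuel : Nat) (g : List (List Int))
      (res : PySem.Dict Int (List (Int × Int))) (cor : Int),
    pvRM lin col = pre ++ ps →
    (∀ p ∈ pre, pvGet g p.1 p.2 ≠ 0) →
    pvGS lin col g →
    a ≤ cor →
    (0 < a ∨ cor + (pvZr lin col g : Int) ≤ 0) →
    pvZr lin col g < fuel →
    res.items = pvDmap lin col a cor g →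
    (pvOuterA lin col fuel g res cor).items
      = pvDmap lin col a (ps.foldl (pvStep lin col) (g, cor)).2
          ((ps.foldl (pvStep lin col) (g, cor)).1) := by
  intro ps
  induction ps with
  | nil =>
    intro pre fuel g res cor hsplit hpre hGS hac hinv hfuel hres
    have hfind : pvFindZero g lin col = none := by
      rw [pvFindZero_eq, hsplit, List.append_nil, List.find?_eq_none]
      intro p hp
      simp [hpre p hp]
    cases fuel with
    | zero => omega
    | succ n => simp only [pvOuterA, hfind, List.foldl_nil]; exact hres
  | cons p ps ih =>
    intro pre fuel g res cor hsplit hpre hGS hac hinv hfuel hres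
    by_cases hz : pvGet g p.1 p.2 = 0
    · -- a fill happens at p
      have hpmem : p ∈ pvRM lin col := by
        rw [hsplit]; exact List.mem_append_right _ (List.mem_cons_self)
      have hb := mem_pvRM.1 hpmem
      have hzr1 : 0 < pvZr lin col g := by
        rw [pvZr, List.countP_pos_iff]
        exact ⟨p, hpmem, by simp [hz]⟩
      have hc0 : cor ≠ 0 := by
        rcases hinv with h | h
        · omega
        · omega
      cases fuel with
      | zero => omega
      | succ f =>
        have hfind : pvFindZero g lin col = some p := by
          rw [pvFindZero_eq, hsplit]
          exact find?_first _ pre ps p (fun y hy => by simp [hpre y hy]) (by simp [hz])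
        have hbounds := pvRM_row_bound hGS hb
        set g' := pvFill lin col g p.1 p.2 cor with hg'
        obtain ⟨hchg, hml⟩ := pvFill_chg lin col g p.1 p.2 cor hb.1 hb.2.2.1 hz
        have hGS' : pvGS lin col g' := pvGS_of_map_length hml hGS
        have hstart : pvGet g' p.1 p.2 = cor :=
          pvFill_start lin col g p.1 p.2 cor hb.1 hb.2.2.1 hz hbounds.1 hbounds.2
        have hzr' : pvZr lin col g' < pvZr lin col g :=
          pvZr_lt hc0 hchg hpmem hz hstart
        -- keys of res
        have hkeys : res.keys = PySem.List.pyRange a cor 1 := by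
          have : res.keys = res.items.map Prod.fst := rfl
          rw [this, hres, pvDmap]
          simp [Function.comp_def]
        have hnc : res.contains cor = false := by
          by_cases h : res.contains cor = true
          · exfalso
            have := (PySem.Dict.contains_iff_mem_keys _ _).1 h
            rw [hkeys] at this
            have := PySem.List.mem_pyRange_one.1 this
            omega
          · simpa using h
        -- dmap is stable under the fill for colors < cor
        have hdm : pvDmap lin col a cor g = pvDmap lin col a cor g' := by
          unfold pvDmap
          apply List.map_congr_left
          intro c hc
          have hcr := PySem.List.mem_pyRange_one.1 hc
          have hcne : c ≠ 0 := by
            rcases hinv with h | h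
            · omega
            · omega
          rw [pvCoords_congr hchg hcne (by omega)]
        have hres' : (res.insert cor (pvScanColor g' lin col cor)).items
            = pvDmap lin col a (cor + 1) g' := by
          rw [PySem.Dict.items_insert_of_not_contains _ _ hnc, hres, hdm,
            pvScanColor_eq, pvDmap, pvDmap,
            PySem.List.pyRange_one_succ_right hac, List.map_append]
          rfl
        have hpre' : ∀ q ∈ pre ++ [p], pvGet g' q.1 q.2 ≠ 0 := by
          intro q hq
          rcases List.mem_append.1 hq with hql | hqr
          · rcases hchg q.1 q.2 (mem_pvRM.1 (by rw [hsplit]; exact List.mem_append_left _ hql)).1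
              (mem_pvRM.1 (by rw [hsplit]; exact List.mem_append_left _ hql)).2.2.1 with h | ⟨h0, _⟩
            · rw [h]; exact hpre q hql
            · exact absurd h0 (hpre q hql)
          · have : q = p := by simpa using hqr
            rw [this, hstart]; exact hc0
        have hstep : (p :: ps).foldl (pvStep lin col) (g, cor)
            = ps.foldl (pvStep lin col) (g', cor + 1) := by
          rw [List.foldl_cons, pvStep, if_pos hz]
        rw [hstep]
        have hA : pvOuterA lin col (f + 1) g res cor
            = pvOuterA lin col f g' (res.insert cor (pvScanColor g' lin col cor)) (cor + 1) := by
          simp only [pvOuterA, hfind]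
          rw [colorir_regiao_eq hGS hb hz]
        rw [hA]
        exact ih (pre ++ [p]) f g' _ (cor + 1)
          (by rw [hsplit, List.append_assoc]; rfl)
          hpre' hGS' (by omega)
          (by rcases hinv with h | h
              · exact Or.inl h
              · exact Or.inr (by omega))
          (by omega) hres'
    · -- cell already non-zero: skipped by B, invisible to A
      have hstep : (p :: ps).foldl (pvStep lin col) (g, cor)
          = ps.foldl (pvStep lin col) (g, cor) := by
        rw [List.foldl_cons, pvStep, if_neg hz]
      rw [hstep]
      exact ih (pre ++ [p]) fuel g res cor
        (by rw [hsplit, List.append_assoc]; rfl)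
        (by intro q hq
            rcases List.mem_append.1 hq with hql | hqr
            · exact hpre q hql
            · have : q = p := by simpa using hqr
              rw [this]; exact hz)
        hGS hac hinv hfuel hres

theorem pvTail (lin col a : Int) (g0 : List (List Int)) (cor0 : Int)
    (res0 : PySem.Dict Int (List (Int × Int)))
    (hGS : pvGS lin col g0) (hac : a ≤ cor0)
    (hinv : 0 < a ∨ cor0 + (pvZr lin col g0 : Int) ≤ 0)
    (hfuel : pvZr lin col g0 < lin.toNat * col.toNat + 1)
    (hres : res0.items = pvDmap lin col a cor0 g0) :
    (pvOuterA lin col (lin.toNat * col.toNat + 1) g0 res0 cor0).items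
      = (pvCollect lin col a (pvOuterB lin col g0 cor0).2 (pvOuterB lin col g0 cor0).1).items := by
  rw [pvOuterB_eq, pvCollect_items]
  exact pvMain lin col a (pvRM lin col) [] _ g0 res0 cor0 (List.nil_append _).symm
    (by intro q hq; simp at hq) hGS hac hinv hfuel hres

theorem pv_final (grid : List (List Int)) (inicio : Option (Int × Int)) (a : Int)
    (hpre : Pre_colorir_todas_regioes grid inicio a) :
    colorir_todas_regioes grid inicio a = colorir_todas_regioes_alt grid inicio a := by
  obtain ⟨hrows, hcolor⟩ := hpre
  unfold colorir_todas_regioes colorir_todas_regioes_alt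
  by_cases hnil : (grid.length : Int) = 0
  · rw [if_pos hnil, if_pos hnil]
  · rw [if_neg hnil, if_neg hnil]
    set lin : Int := (grid.length : Int) with hlin
    set col : Int := ((grid.headD []).length : Int) with hcol
    have hGS : pvGS lin col grid := ⟨rfl, rfl, hrows⟩
    have hzeq : pvZeros grid = pvZr lin col grid := rfl
    have hzle : pvZr lin col grid ≤ lin.toNat * col.toNat := by
      have := List.countP_le_length (l := pvRM lin col)
        (p := fun p => decide (pvGet grid p.1 p.2 = 0))
      rw [length_pvRM] at this
      exact this
    -- shared setup for the two "no initial fill" situations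
    have base : (pvOuterA lin col (lin.toNat * col.toNat + 1) grid PySem.Dict.empty a).items
        = (pvCollect lin col a (pvOuterB lin col grid a).2 (pvOuterB lin col grid a).1).items := by
      apply pvTail lin col a grid a PySem.Dict.empty hGS le_rfl
      · rcases hcolor with h | h
        · exact Or.inl (by omega)
        · exact Or.inr (by rw [hzeq] at h; omega)
      · omega
      · show ([] : List (Int × List (Int × Int))) = pvDmap lin col a a grid
        rw [pvDmap, PySem.List.pyRange_one_eq_nil le_rfl]
        rfl
    cases inicio with
    | none => exact base
    | some s =>
      by_cases hC : 0 ≤ s.1 ∧ s.1 < lin ∧ 0 ≤ s.2 ∧ s.2 < col ∧ pvGet grid s.1 s.2 = 0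
      · simp only [if_pos hC]
        obtain ⟨hb1, hb2, hb3, hb4, hz⟩ := hC
        have hb : 0 ≤ s.1 ∧ s.1 < lin ∧ 0 ≤ s.2 ∧ s.2 < col := ⟨hb1, hb2, hb3, hb4⟩
        rw [colorir_regiao_eq hGS hb hz]
        set g1 := pvFill lin col grid s.1 s.2 a with hg1
        obtain ⟨hchg, hml⟩ := pvFill_chg lin col grid s.1 s.2 a hb1 hb3 hz
        have hGS1 : pvGS lin col g1 := pvGS_of_map_length hml hGS
        have hsmem : s ∈ pvRM lin col := mem_pvRM.2 hb
        have hzr1 : 0 < pvZr lin col grid := by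
          rw [pvZr, List.countP_pos_iff]
          exact ⟨s, hsmem, by simp [hz]⟩
        have hbounds := pvRM_row_bound hGS hb
        have hstart : pvGet g1 s.1 s.2 = a :=
          pvFill_start lin col grid s.1 s.2 a hb1 hb3 hz hbounds.1 hbounds.2
        have ha0 : a ≠ 0 := by
          rcases hcolor with h | h
          · omega
          · rw [hzeq] at h; omega
        have hzlt : pvZr lin col g1 < pvZr lin col grid := pvZr_lt ha0 hchg hsmem hz hstart
        have hres1 : (PySem.Dict.empty.insert a (pvScanColor g1 lin col a)).items
            = pvDmap lin col a (a + 1) g1 := by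
          rw [PySem.Dict.items_insert_of_not_contains _ _ (PySem.Dict.contains_empty a),
            pvScanColor_eq, pvDmap, PySem.List.pyRange_one_singleton]
          rfl
        apply pvTail lin col a g1 (a + 1) _ hGS1 (by omega)
        · rcases hcolor with h | h
          · exact Or.inl (by omega)
          · rw [hzeq] at h
            exact Or.inr (by omega)
        · omega
        · exact hres1
      · simp only [if_neg hC]
        exact base

-- ===== VERDICT (by name: the statement is the Claim_ definition above) =====
theorem colorir_todas_regioes_spec : Claim_equal_colorir_todas_regioes := by
  intro grid inicio primeiro_cor _ hpre
  exact pv_final grid inicio primeiro_cor hpre
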